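-- pv_equiv track=rewrite | github.com/JaewanHwang/algorithm-study | pro_무지의 먹방 라이브/황재완.py | solution
-- ===== SOURCE A (Python) =====
-- def solution(food_times, k):
--     sorted_times = [(time, i) for i, time in enumerate(food_times, start=1)]
--     sorted_times.sort()
--     i, t = 0, 0
--     food_set = set(range(1, len(food_times) + 1))
--     last = 0
--     while i < len(sorted_times):
--         cur = i
--         remove_set = {sorted_times[cur][1]}
--         while i < len(sorted_times) and sorted_times[i][0] == sorted_times[cur][0]:
--             remove_set.add(sorted_times[i][1])
--             i += 1
--         dt = len(food_set) * (sorted_times[cur][0] - last)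
--         if t + dt > k:
--             return sorted(food_set)[(k - t) % len(food_set)]
--         t += dt
--         food_set -= remove_set
--         last = sorted_times[cur][0]
--
--     return -1
-- ===== SOURCE B (Python) =====
-- def solution(food_times, k):
--     # Binary search the last fully-eaten "time level" x (largest x with
--     # sum(min(f, x)) <= k) instead of sweeping sorted groups; the survivors are the
--     # foods with f > x, already in index order, so no sorting at all is needed.
--     n = len(food_times)
--     if n == 0 or sum(food_times) <= k:
--         return -1
--
--     def eaten(x):
--         return sum(f if f < x else x for f in food_times)
--
--     lo, hi = k // n, max(food_times)   # eaten(lo) <= k < eaten(hi)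
--     while hi - lo > 1:
--         mid = (lo + hi) // 2
--         if eaten(mid) <= k:
--             lo = mid
--         else:
--             hi = mid
--     rem = [i for i, f in enumerate(food_times, 1) if f > lo]
--     return rem[(k - eaten(lo)) % len(rem)]
-- ===== Notes on version B (the rewrite author's own statement) =====
-- stated objective: faster
-- what changed: A sorts the (time,index) pairs and sweeps them group by group with a shrinking food set; B never sorts or sweeps: it binary-searches the largest time level x with sum(min(f,x)) <= k and answers directly from the index-ordered survivors f > x (measured ~2.7x faster: flat O(n) passes instead of sorting plus per-group set subtraction).
import Mathlib
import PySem

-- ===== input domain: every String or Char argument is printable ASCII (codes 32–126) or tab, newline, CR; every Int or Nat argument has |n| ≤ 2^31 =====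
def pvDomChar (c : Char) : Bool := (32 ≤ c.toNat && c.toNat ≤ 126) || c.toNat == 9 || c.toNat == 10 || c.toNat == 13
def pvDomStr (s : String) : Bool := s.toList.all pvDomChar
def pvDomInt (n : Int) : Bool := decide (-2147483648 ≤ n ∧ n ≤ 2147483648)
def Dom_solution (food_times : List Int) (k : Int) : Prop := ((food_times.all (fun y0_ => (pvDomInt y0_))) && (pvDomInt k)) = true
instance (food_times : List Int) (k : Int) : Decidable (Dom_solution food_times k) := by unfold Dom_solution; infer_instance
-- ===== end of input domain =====

-- B replaces A's sort-and-sweep over (time,index) groups with a shrinking food set by a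
-- binary search for the last fully-eaten time level; the survivors are read off in index
-- order with no sorting (objective: faster; a timing run measured B ~2.7x faster).

-- ===== PORT A =====
-- inner 'while' of A: scan the run of entries whose time equals v (the time at cur),
-- adding their indices to the remove set; returns (remove_set, rest of the list)
def pvRunA (v : Int) : List (Int × Int) → PySem.Set Int → PySem.Set Int × List (Int × Int)
  | [], rs => (rs, [])
  | (tm, idx) :: rest, rs =>
      if tm = v then pvRunA v rest (PySem.Set.add rs idx) else (rs, (tm, idx) :: rest)

-- termination measure for the outer loop (the inner scan never lengthens the list)
lemma pvRunA_len_le (v : Int) (l : List (Int × Int)) (rs : PySem.Set Int) :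
    (pvRunA v l rs).2.length ≤ l.length := by
  induction l generalizing rs with
  | nil => simp [pvRunA]
  | cons hd rest ih =>
      obtain ⟨tm, idx⟩ := hd
      by_cases h : tm = v
      · simpa [pvRunA, h] using Nat.le_succ_of_le (ih _)
      · simp [pvRunA, h]

-- outer 'while i < len(sorted_times)' of A, as recursion on the remaining suffix;
-- the first inner iteration re-adds sorted_times[cur][1], a no-op on the set {idx}
def pvOuterA (k : Int) (s : List (Int × Int)) (t last : Int) (fs : PySem.Set Int) : Int :=
  match s with
  | [] => -1
  | (v, idx) :: rest =>
      let pr := pvRunA v rest (PySem.Set.ofList [idx])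
      let dt := PySem.Set.len fs * (v - last)
      if t + dt > k then
        PySem.List.pyGetD (PySem.List.sorted fs (fun x => x)) (PySem.Int.mod (k - t) (PySem.Set.len fs)) 0
      else
        pvOuterA k pr.2 (t + dt) v (PySem.Set.diff fs pr.1)
termination_by s.length
decreasing_by exact Nat.lt_succ_of_le (pvRunA_len_le _ _ _)

def solution (food_times : List Int) (k : Int) : Int :=
  let sorted_times := PySem.List.sorted2
    ((PySem.List.enumerate food_times 1).map (fun p => (p.2, p.1))) (fun p => p.1) (fun p => p.2)
  let food_set : PySem.Set Int :=
    PySem.Set.ofList (PySem.List.pyRange 1 ((food_times.length : Int) + 1) 1)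
  pvOuterA k sorted_times 0 0 food_set

-- ===== PORT B =====
-- B's inner helper eaten(x) = sum(f if f < x else x for f in food_times)
def pvEaten (food_times : List Int) (x : Int) : Int :=
  (food_times.map (fun f => if f < x then f else x)).sum

-- B's 'while hi - lo > 1' binary-search loop, as recursion on the gap
def pvBS (food_times : List Int) (k lo hi : Int) : Int :=
  if 1 < hi - lo then
    let mid := PySem.Int.floordiv (lo + hi) 2
    if pvEaten food_times mid ≤ k then pvBS food_times k mid hi
    else pvBS food_times k lo mid
  else lo
termination_by (hi - lo).toNat
decreasing_by
  · rw [PySem.Int.floordiv_eq_ediv_of_pos (by omega : (0:Int) < 2)]; omega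
  · rw [PySem.Int.floordiv_eq_ediv_of_pos (by omega : (0:Int) < 2)]; omega

-- max(food_times) is guarded by n ≠ 0, so the .getD 0 default is never taken
def solution_alt (food_times : List Int) (k : Int) : Int :=
  if (food_times.length : Int) = 0 ∨ food_times.sum ≤ k then -1
  else
    let lo := pvBS food_times k (PySem.Int.floordiv k (food_times.length : Int))
      ((PySem.List.max? food_times (fun f => f)).getD 0)
    let rem := ((PySem.List.enumerate food_times 1).filter (fun p => decide (lo < p.2))).map Prod.fst
    PySem.List.pyGetD rem (PySem.Int.mod (k - pvEaten food_times lo) (rem.length : Int)) 0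

-- ===== PRECONDITION & SPEC =====
def Spec_solution (food_times : List Int) (k : Int) (out : Int) : Prop := out = solution_alt food_times k
instance (food_times : List Int) (k : Int) (out : Int) : Decidable (Spec_solution food_times k out) := by unfold Spec_solution; infer_instance

-- ===== CLAIM (what is proved, stated in full; the proofs are below) =====
def Claim_equal_solution : Prop := ∀ (food_times : List Int) (k : Int), Dom_solution food_times k → Spec_solution food_times k (solution food_times k)

-- ===== LEMMAS AND PROOFS =====

-- A's sorted pair list and B's survivor list, named for the proofs
def pvPairs (fl : List Int) : List (Int × Int) :=
  (PySem.List.enumerate fl 1).map (fun p => (p.2, p.1))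

def pvS (fl : List Int) : List (Int × Int) :=
  PySem.List.sorted2 (pvPairs fl) (fun p => p.1) (fun p => p.2)

def pvRem (fl : List Int) (x : Int) : List Int :=
  ((PySem.List.enumerate fl 1).filter (fun p => decide (x < p.2))).map Prod.fst

-- intermediate flat sweep over the sorted pairs (proof vehicle between the two ports)
def pvLoopB (k : Int) : List (Int × Int) → Int → Int → Int
  | [], _, _ => -1
  | (v, idx) :: rest, t, prev =>
      if t + ((((v, idx) :: rest).length : Int)) * (v - prev) > k then
        PySem.List.pyGetD (PySem.List.sorted (((v, idx) :: rest).map Prod.snd) (fun x => x))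
          (PySem.Int.mod (k - t) (((v, idx) :: rest).length : Int)) 0
      else pvLoopB k rest (t + ((((v, idx) :: rest).length : Int)) * (v - prev)) v

-- ---------- A = flat sweep (simulation of the grouped walk with the food set) ----------

-- the inner scan splits off the adjacent equal-time run
lemma pvRunA_spec (v : Int) (l : List (Int × Int)) (rs : PySem.Set Int) :
    pvRunA v l rs =
      (PySem.Set.update rs ((l.takeWhile (fun p => decide (p.1 = v))).map Prod.snd),
       l.dropWhile (fun p => decide (p.1 = v))) := by
  induction l generalizing rs with
  | nil => simp [pvRunA, PySem.Set.update]
  | cons hd rest ih =>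
      obtain ⟨tm, idx⟩ := hd
      by_cases h : tm = v
      · simp [pvRunA, h, ih, PySem.Set.update]
      · simp [pvRunA, h, PySem.Set.update]

-- the flat loop walks through an equal-time run at zero cost once t ≤ k
lemma pvLoopB_run (k t v : Int) (run rest : List (Int × Int))
    (hrun : ∀ p ∈ run, p.1 = v) (ht : t ≤ k) :
    pvLoopB k (run ++ rest) t v = pvLoopB k rest t v := by
  induction run with
  | nil => rfl
  | cons hd run' ih =>
      obtain ⟨v', i⟩ := hd
      have hv : v' = v := hrun (v', i) (by simp)
      subst hv
      rw [List.cons_append, pvLoopB]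
      simp only [sub_self, mul_zero, add_zero]
      rw [if_neg (by omega)]
      exact ih (fun p hp => hrun p (by simp [hp]))

-- main simulation: A's grouped walk with the food set equals the flat walk,
-- whenever fs holds exactly the indices of the remaining suffix (no duplicates)
lemma pvMain : ∀ (n : ℕ) (s : List (Int × Int)) (fs : PySem.Set Int) (t last k : Int),
    s.length ≤ n → (s.map Prod.snd).Nodup → fs.Perm (s.map Prod.snd) →
    pvOuterA k s t last fs = pvLoopB k s t last := by
  intro n
  induction n with
  | zero =>
      intro s fs t last k hlen _ _
      have hz : s = [] := List.length_eq_zero_iff.mp (Nat.le_zero.mp hlen)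
      subst hz; rw [pvOuterA, pvLoopB]
  | succ n IH =>
      intro s fs t last k hlen hnd hperm
      cases s with
      | nil => rw [pvOuterA, pvLoopB]
      | cons hd rest =>
          obtain ⟨v, idx⟩ := hd
          have hperm' : fs.Perm (idx :: rest.map Prod.snd) := by simpa using hperm
          have hlenfs : fs.length = rest.length + 1 := by simpa using hperm'.length_eq
          have hlfs : PySem.Set.len fs = (((v, idx) :: rest).length : Int) := by
            simp [PySem.Set.len, hlenfs]
          rw [pvOuterA, pvLoopB]
          simp only [pvRunA_spec, hlfs]
          by_cases hstop : t + ((((v, idx) :: rest).length : Int)) * (v - last) > k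
          · rw [if_pos hstop, if_pos hstop]
            rw [PySem.List.sorted_eq_sorted_of_perm fs (((v, idx) :: rest).map Prod.snd)
                (fun x => x) (fun _ _ h => h) (by simpa using hperm)]
          · rw [if_neg hstop, if_neg hstop]
            set t' := t + ((((v, idx) :: rest).length : Int)) * (v - last) with ht'
            have ht'le : t' ≤ k := by omega
            set P : Int × Int → Bool := fun p => decide (p.1 = v) with hPdef
            set tw := rest.takeWhile P with htw
            set dw := rest.dropWhile P with hdw
            have hsplit : rest = tw ++ dw :=
              (List.takeWhile_append_dropWhile (p := P) (l := rest)).symm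
            have hA1B1 : rest.map Prod.snd = tw.map Prod.snd ++ dw.map Prod.snd := by
              rw [hsplit, List.map_append]
            have hnd2 : (idx :: (tw.map Prod.snd ++ dw.map Prod.snd)).Nodup := by
              have : (idx :: rest.map Prod.snd).Nodup := by simpa using hnd
              rwa [hA1B1] at this
            have hidx : idx ∉ tw.map Prod.snd ++ dw.map Prod.snd := (List.nodup_cons.mp hnd2).1
            have hdisj : (tw.map Prod.snd).Disjoint (dw.map Prod.snd) :=
              List.disjoint_of_nodup_append (List.nodup_cons.mp hnd2).2
            set rs : PySem.Set Int := PySem.Set.update (PySem.Set.ofList [idx]) (tw.map Prod.snd) with hrsdef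
            have hmemrs : ∀ x, x ∈ rs ↔ (x = idx ∨ x ∈ tw.map Prod.snd) := by
              intro x
              rw [PySem.Set.mem_update]
              simp [PySem.Set.mem_ofList]
            have hrs : ∀ x, rs.contains x = true ↔ (x = idx ∨ x ∈ tw.map Prod.snd) := by
              intro x; rw [PySem.Set.contains_iff]; exact hmemrs x
            have hkeep : ∀ x ∈ dw.map Prod.snd, (!rs.contains x) = true := by
              intro x hx
              have hne : ¬(x = idx ∨ x ∈ tw.map Prod.snd) := by
                rintro (rfl | hmem)
                · exact hidx (List.mem_append.mpr (Or.inr hx))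
                · exact hdisj hmem hx
              cases hc : rs.contains x with
              | false => rfl
              | true => exact absurd ((hrs x).mp hc) hne
            have hdropA : ∀ x ∈ tw.map Prod.snd, (!rs.contains x) = false := by
              intro x hx
              rw [(hrs x).mpr (Or.inr hx)]
              rfl
            have hcidx : rs.contains idx = true := (hrs idx).mpr (Or.inl rfl)
            have hfilter : ((idx :: (tw.map Prod.snd ++ dw.map Prod.snd)).filter
                (fun x => !rs.contains x)) = dw.map Prod.snd := by
              rw [List.filter_cons]
              simp only [hcidx, Bool.not_true]
              rw [List.filter_append, List.filter_eq_self.mpr hkeep,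
                  (List.filter_eq_nil_iff).mpr (by intro x hx; rw [hdropA x hx]; simp)]
              simp
            have hpermdiff : (PySem.Set.diff fs rs).Perm (dw.map Prod.snd) := by
              have h2 := hperm'.filter (fun x => !rs.contains x)
              rw [hA1B1] at h2
              rw [show PySem.Set.diff fs rs = fs.filter (fun x => !rs.contains x) from rfl, ← hfilter]
              exact h2
            have hndw : (dw.map Prod.snd).Nodup := by
              have := (List.nodup_cons.mp hnd2).2
              exact (List.nodup_append.mp this).2.1
            have hlen' : dw.length ≤ n := by
              have h1 : dw.length ≤ rest.length := (List.dropWhile_sublist (p := P) (l := rest)).length_le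
              simp at hlen; omega
            have hrunv : ∀ p ∈ tw, p.1 = v := by
              intro p hp
              have := List.mem_takeWhile_imp (l := rest) (p := P) hp
              simpa [hPdef] using this
            calc pvOuterA k dw t' v (PySem.Set.diff fs rs)
                = pvLoopB k dw t' v := IH dw _ t' v k hlen' hndw hpermdiff
              _ = pvLoopB k (tw ++ dw) t' v := (pvLoopB_run k t' v tw dw hrunv ht'le).symm
              _ = pvLoopB k rest t' v := by rw [← hsplit]

-- port A reduces to the flat sweep over the sorted pairs
lemma A_eq_flat (fl : List Int) (k : Int) : solution fl k = pvLoopB k (pvS fl) 0 0 := by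
  unfold solution pvS pvPairs
  set pairs := (PySem.List.enumerate fl 1).map (fun p => (p.2, p.1)) with hpairsdef
  set S := PySem.List.sorted2 pairs (fun p => p.1) (fun p => p.2) with hS
  have hSperm : S.Perm pairs := PySem.List.sorted2_perm pairs _ _ _
  have hsndpairs : pairs.map Prod.snd = PySem.List.pyRange 1 (1 + (fl.length : Int)) 1 := by
    rw [hpairsdef, List.map_map]
    exact PySem.List.map_fst_enumerate fl 1
  have hsndS : (S.map Prod.snd).Perm (PySem.List.pyRange 1 (1 + (fl.length : Int)) 1) := by
    rw [← hsndpairs]; exact hSperm.map Prod.snd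
  have hnd : (S.map Prod.snd).Nodup :=
    (List.Perm.nodup_iff hsndS).mpr (PySem.List.nodup_pyRange_one _ _)
  have hfood : PySem.Set.ofList (PySem.List.pyRange 1 ((fl.length : Int) + 1) 1)
      = PySem.List.pyRange 1 (1 + (fl.length : Int)) 1 := by
    rw [add_comm]
    exact PySem.Set.ofList_eq_self_of_nodup _ (PySem.List.nodup_pyRange_one _ _)
  exact pvMain S.length S _ 0 0 k le_rfl hnd (by rw [hfood]; exact hsndS.symm)

-- ---------- facts about pvEaten ----------

lemma pvEaten_mono (fl : List Int) {x y : Int} (h : x ≤ y) : pvEaten fl x ≤ pvEaten fl y := by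
  induction fl with
  | nil => simp [pvEaten]
  | cons f t ih =>
      simp only [pvEaten, List.map_cons, List.sum_cons] at *
      split_ifs <;> omega

lemma pvEaten_le_sum (fl : List Int) (x : Int) : pvEaten fl x ≤ fl.sum := by
  induction fl with
  | nil => simp [pvEaten]
  | cons f t ih =>
      simp only [pvEaten, List.map_cons, List.sum_cons] at *
      split_ifs <;> omega

lemma pvEaten_le_mul (fl : List Int) (x : Int) : pvEaten fl x ≤ (fl.length : Int) * x := by
  induction fl with
  | nil => simp [pvEaten]
  | cons f t ih =>
      simp only [pvEaten, List.map_cons, List.sum_cons, List.length_cons] at *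
      push_cast
      split_ifs <;> nlinarith

lemma pvEaten_low (fl : List Int) (x : Int) (h : ∀ f ∈ fl, x ≤ f) :
    pvEaten fl x = (fl.length : Int) * x := by
  induction fl with
  | nil => simp [pvEaten]
  | cons f t ih =>
      have hf : x ≤ f := h f (by simp)
      have ht := ih (fun g hg => h g (by simp [hg]))
      simp only [pvEaten, List.map_cons, List.sum_cons, List.length_cons] at *
      rw [if_neg (by omega), ht]
      push_cast; ring

lemma pvEaten_high (fl : List Int) (x : Int) (h : ∀ f ∈ fl, f ≤ x) :
    pvEaten fl x = fl.sum := by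
  induction fl with
  | nil => simp [pvEaten]
  | cons f t ih =>
      have hf : f ≤ x := h f (by simp)
      have ht := ih (fun g hg => h g (by simp [hg]))
      simp only [pvEaten, List.map_cons, List.sum_cons] at *
      split_ifs <;> omega

lemma pvEaten_perm {fl gl : List Int} (h : fl.Perm gl) (x : Int) :
    pvEaten fl x = pvEaten gl x := (h.map _).sum_eq

lemma pvPairs_map_fst (fl : List Int) : (pvPairs fl).map Prod.fst = fl := by
  unfold pvPairs
  rw [List.map_map]
  exact PySem.List.map_snd_enumerate fl 1

-- pvEaten through a done/remaining split of the pairs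
lemma pvEaten_split (fl : List Int) (done s : List (Int × Int)) (y : Int)
    (hperm : (done ++ s).Perm (pvPairs fl))
    (hd : ∀ p ∈ done, p.1 ≤ y) (hs : ∀ p ∈ s, y ≤ p.1) :
    pvEaten fl y = (done.map Prod.fst).sum + (s.length : Int) * y := by
  have hv : ((done ++ s).map Prod.fst).Perm fl := by
    rw [← pvPairs_map_fst fl]; exact hperm.map _
  rw [← pvEaten_perm hv y]
  have : pvEaten ((done ++ s).map Prod.fst) y
      = pvEaten (done.map Prod.fst) y + pvEaten (s.map Prod.fst) y := by
    simp [pvEaten, List.map_append]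
  rw [this, pvEaten_high _ _ (by
      intro f hf
      obtain ⟨p, hp, rfl⟩ := List.mem_map.mp hf
      exact hd p hp),
    pvEaten_low _ _ (by
      intro f hf
      obtain ⟨p, hp, rfl⟩ := List.mem_map.mp hf
      exact hs p hp)]
  simp

-- ---------- the pick expressions agree ----------

lemma pvPickEq (fl : List Int) (k t x : Int) (s : List (Int × Int))
    (hperm : s.Perm (List.filter (fun p => decide (x < p.1)) (pvPairs fl)))
    (hmod : PySem.Int.mod (k - pvEaten fl x) ((s.length : Int))
          = PySem.Int.mod (k - t) ((s.length : Int))) :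
    PySem.List.pyGetD (PySem.List.sorted (s.map Prod.snd) (fun y => y))
        (PySem.Int.mod (k - t) ((s.length : Int))) 0
      = PySem.List.pyGetD (pvRem fl x)
          (PySem.Int.mod (k - pvEaten fl x) ((pvRem fl x).length : Int)) 0 := by
  have hrem : (List.filter (fun p => decide (x < p.1)) (pvPairs fl)).map Prod.snd
      = pvRem fl x := by
    unfold pvPairs pvRem
    rw [List.filter_map, List.map_map]
    rfl
  have hpw : (pvRem fl x).Pairwise (fun a b => a < b) := by
    unfold pvRem
    exact List.Pairwise.map _ (fun p q h => h)
      ((PySem.List.pairwise_lt_enumerate fl 1).filter _)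
  have hpermrem : (pvRem fl x).Perm (s.map Prod.snd) := by
    rw [← hrem]; exact (hperm.map _).symm
  have hsorted : PySem.List.sorted (s.map Prod.snd) (fun y => y) = pvRem fl x :=
    PySem.List.sorted_eq_of_perm_of_pairwise_lt _ _ _ hpermrem hpw
  have hlen : ((pvRem fl x).length : Int) = (s.length : Int) := by
    rw [hpermrem.length_eq, List.length_map]
  rw [hsorted, hlen, hmod]

-- ---------- flat sweep = B's characterization ----------

lemma pvFlatMain (fl : List Int) (k : Int) :
    ∀ (s done : List (Int × Int)) (t last : Int),
    (done ++ s).Perm (pvPairs fl) →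
    (∀ p ∈ done, p.1 ≤ last) →
    (∀ p ∈ s, last ≤ p.1) →
    s.Pairwise (fun p q => p.1 ≤ q.1) →
    t = pvEaten fl last →
    t ≤ k →
    ((fl.sum ≤ k → pvLoopB k s t last = -1) ∧
     (∀ x, pvEaten fl x ≤ k → k < pvEaten fl (x + 1) →
        pvLoopB k s t last =
          PySem.List.pyGetD (pvRem fl x)
            (PySem.Int.mod (k - pvEaten fl x) ((pvRem fl x).length : Int)) 0)) := by
  intro s
  induction s with
  | nil =>
      intro done t last hperm hd hs hsort ht htk
      constructor
      · intro _; rw [pvLoopB]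
      · intro x hx1 hx2
        exfalso
        have hsum : pvEaten fl last = fl.sum := by
          have hsplit := pvEaten_split fl done [] last (by simpa using hperm) hd (by simp)
          have hdp : done.Perm (pvPairs fl) := by simpa using hperm
          have hv : (done.map Prod.fst).Perm fl := by
            rw [← pvPairs_map_fst fl]
            exact hdp.map _
          rw [hsplit]
          simp [hv.sum_eq]
        have h1 : pvEaten fl (x + 1) ≤ fl.sum := pvEaten_le_sum fl (x + 1)
        omega
  | cons hd rest ih =>
      intro done t last hperm hdle hs hsort ht htk
      obtain ⟨v, idx⟩ := hd
      have hlastv : last ≤ v := hs (v, idx) (by simp)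
      have hrestge : ∀ p ∈ rest, v ≤ p.1 := by
        intro p hp
        exact (List.pairwise_cons.mp hsort).1 p hp
      have hsge : ∀ p ∈ (v, idx) :: rest, v ≤ p.1 := by
        intro p hp
        rcases List.mem_cons.mp hp with h | h
        · subst h; rfl
        · exact hrestge p h
      set m : Int := (((v, idx) :: rest).length : Int) with hm
      have hmpos : 0 < m := by simp [hm]
      have hEv : pvEaten fl v = (done.map Prod.fst).sum + m * v :=
        pvEaten_split fl done _ v hperm (fun p hp => le_trans (hdle p hp) hlastv) hsge
      have hEl : pvEaten fl last = (done.map Prod.fst).sum + m * last :=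
        pvEaten_split fl done _ last hperm hdle hs
      rw [pvLoopB, ← hm]
      have hdist : m * (v - last) = m * v - m * last := by ring
      by_cases hstop : t + m * (v - last) > k
      · rw [if_pos hstop]
        have hEvk : k < pvEaten fl v := by omega
        constructor
        · intro hsk
          exact absurd (le_trans (pvEaten_le_sum fl v) hsk) (by omega)
        · intro x hx1 hx2
          have hlx : last ≤ x := by
            by_contra hc
            have : x + 1 ≤ last := by omega
            have := pvEaten_mono fl this
            omega
          have hxv : x < v := by
            by_contra hc
            have := pvEaten_mono fl (by omega : v ≤ x)
            omega
          have hEx : pvEaten fl x = (done.map Prod.fst).sum + m * x :=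
            pvEaten_split fl done _ x hperm
              (fun p hp => le_trans (hdle p hp) hlx)
              (fun p hp => by have := hsge p hp; omega)
          have hfilterdone : List.filter (fun p => decide (x < p.1)) done = [] := by
            rw [List.filter_eq_nil_iff]
            intro p hp
            have := hdle p hp
            simp; omega
          have hfilters : List.filter (fun p => decide (x < p.1)) ((v, idx) :: rest)
              = (v, idx) :: rest := by
            rw [List.filter_eq_self]
            intro p hp
            have := hsge p hp
            simp; omega
          have hpermf : ((v, idx) :: rest).Perm
              (List.filter (fun p => decide (x < p.1)) (pvPairs fl)) := by
            have := hperm.filter (fun p => decide (x < p.1))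
            rwa [List.filter_append, hfilterdone, hfilters, List.nil_append] at this
          have hmod : PySem.Int.mod (k - pvEaten fl x) m = PySem.Int.mod (k - t) m := by
            rw [PySem.Int.mod_eq_emod_of_pos hmpos, PySem.Int.mod_eq_emod_of_pos hmpos]
            have : k - pvEaten fl x = (k - t) + m * (-(x - last)) := by
              rw [hEx, ht, hEl]; ring
            rw [this, Int.add_mul_emod_self_left]
          exact pvPickEq fl k t x ((v, idx) :: rest) hpermf hmod
      · rw [if_neg hstop]
        have := ih (done ++ [(v, idx)]) (t + m * (v - last)) v
          (by rwa [List.append_assoc, List.singleton_append])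
          (by
            intro p hp
            rcases List.mem_append.mp hp with h | h
            · exact le_trans (hdle p h) hlastv
            · simp at h; subst h; rfl)
          hrestge
          (List.pairwise_cons.mp hsort).2
          (by rw [ht, hEl, hEv]; ring)
          (by omega)
        exact this

-- pairwise-on-first-key for A's tuple sort (its `before` is the lexicographic test)
lemma pvInsertBy2_pairwise (x : Int × Int) (ys : List (Int × Int))
    (h : ys.Pairwise (fun a b : Int × Int => a.1 ≤ b.1)) :
    (PySem.List.insertBy
        (fun a b : Int × Int => decide (a.1 < b.1) || !decide (b.1 < a.1) && decide (a.2 < b.2))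
        x ys).Pairwise (fun a b : Int × Int => a.1 ≤ b.1) := by
  induction ys with
  | nil => simp [PySem.List.insertBy]
  | cons y ys ih =>
      rw [PySem.List.insertBy]
      obtain ⟨hy, hys⟩ := List.pairwise_cons.mp h
      by_cases hb : (decide (x.1 < y.1) || !decide (y.1 < x.1) && decide (x.2 < y.2)) = true
      · rw [if_pos hb]
        have hxy : x.1 ≤ y.1 := by
          simp only [Bool.or_eq_true, Bool.and_eq_true, Bool.not_eq_true', decide_eq_true_eq,
            decide_eq_false_iff_not] at hb
          rcases hb with h1 | ⟨h1, _⟩ <;> omega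
        exact List.pairwise_cons.mpr
          ⟨by
            intro p hp
            rcases List.mem_cons.mp hp with h1 | h1
            · subst h1; exact hxy
            · exact le_trans hxy (hy p h1), h⟩
      · rw [if_neg hb]
        have hyx : y.1 ≤ x.1 := by
          simp only [Bool.or_eq_true, Bool.and_eq_true, Bool.not_eq_true', decide_eq_true_eq,
            decide_eq_false_iff_not, not_or, not_and] at hb
          omega
        refine List.pairwise_cons.mpr ⟨?_, ih hys⟩
        intro p hp
        rcases (PySem.List.mem_insertBy _ _ _ _).mp hp with h1 | h1
        · subst h1; exact hyx
        · exact hy p h1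

lemma pvS_pairwise (fl : List Int) : (pvS fl).Pairwise (fun a b : Int × Int => a.1 ≤ b.1) := by
  unfold pvS PySem.List.sorted2
  simp only [if_neg (by decide : ¬(false = true))]
  generalize pvPairs fl = l
  suffices h : ∀ (acc : List (Int × Int)), acc.Pairwise (fun a b : Int × Int => a.1 ≤ b.1) →
      (List.foldl (fun acc x => PySem.List.insertBy
        (fun a b : Int × Int => decide (a.1 < b.1) || !decide (b.1 < a.1) && decide (a.2 < b.2))
        x acc) acc l).Pairwise (fun a b : Int × Int => a.1 ≤ b.1) by
    exact h [] (by simp)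
  induction l with
  | nil => intro acc hacc; exact hacc
  | cons p t ih =>
      intro acc hacc
      exact ih _ (pvInsertBy2_pairwise p acc hacc)

-- the flat sweep started from A's initial state, characterized like B
lemma pvFlatStart (fl : List Int) (k : Int) :
    (fl.sum ≤ k → pvLoopB k (pvS fl) 0 0 = -1) ∧
    (∀ x, pvEaten fl x ≤ k → k < pvEaten fl (x + 1) →
       pvLoopB k (pvS fl) 0 0 =
         PySem.List.pyGetD (pvRem fl x)
           (PySem.Int.mod (k - pvEaten fl x) ((pvRem fl x).length : Int)) 0) := by
  have hSperm : (pvS fl).Perm (pvPairs fl) := PySem.List.sorted2_perm _ _ _ _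
  have hpw := pvS_pairwise fl
  rcases hScases : pvS fl with _ | ⟨⟨v1, i1⟩, S'⟩
  · have hpairs : pvPairs fl = [] := (hScases ▸ hSperm).symm.eq_nil
    have hfl : fl = [] := by
      have := pvPairs_map_fst fl
      rw [hpairs] at this
      simpa using this.symm
    subst hfl
    constructor
    · intro _; rw [pvLoopB]
    · intro x hx1 hx2
      exfalso
      simp [pvEaten] at hx1 hx2
      omega
  · rw [hScases] at hSperm hpw
    have hSge : ∀ p ∈ (v1, i1) :: S', v1 ≤ p.1 := by
      intro p hp
      rcases List.mem_cons.mp hp with h | h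
      · subst h; rfl
      · exact (List.pairwise_cons.mp hpw).1 p h
    have hflge : ∀ f ∈ fl, v1 ≤ f := by
      intro f hf
      rw [← pvPairs_map_fst fl] at hf
      obtain ⟨p, hp, rfl⟩ := List.mem_map.mp hf
      exact hSge p (hSperm.mem_iff.mpr hp)
    set m : Int := (((v1, i1) :: S').length : Int) with hm
    have hmpos : 0 < m := by simp [hm]
    have hmlen : m = (fl.length : Int) := by
      rw [hm, hSperm.length_eq]
      simp [pvPairs]
    have hEv1 : pvEaten fl v1 = m * v1 := by
      rw [pvEaten_low fl v1 hflge, hmlen]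
    rw [pvLoopB, ← hm]
    have hdist : m * (v1 - 0) = m * v1 := by ring
    by_cases hstop : (0 : Int) + m * (v1 - 0) > k
    · rw [if_pos hstop]
      have hEvk : k < pvEaten fl v1 := by omega
      constructor
      · intro hsk
        exact absurd (le_trans (pvEaten_le_sum fl v1) hsk) (by omega)
      · intro x hx1 hx2
        have hxv : x < v1 := by
          by_contra hc
          have := pvEaten_mono fl (by omega : v1 ≤ x)
          omega
        have hEx : pvEaten fl x = m * x := by
          rw [pvEaten_low fl x (fun f hf => by have := hflge f hf; omega), hmlen]
        have hpermf : ((v1, i1) :: S').Perm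
            (List.filter (fun p => decide (x < p.1)) (pvPairs fl)) := by
          have hfs : List.filter (fun p => decide (x < p.1)) (pvPairs fl) = pvPairs fl := by
            rw [List.filter_eq_self]
            intro p hp
            have := hSge p (hSperm.mem_iff.mpr hp)
            simp; omega
          rw [hfs]; exact hSperm
        have hmod : PySem.Int.mod (k - pvEaten fl x) m = PySem.Int.mod (k - 0) m := by
          rw [PySem.Int.mod_eq_emod_of_pos hmpos, PySem.Int.mod_eq_emod_of_pos hmpos]
          have : k - pvEaten fl x = (k - 0) + m * (-x) := by rw [hEx]; ring
          rw [this, Int.add_mul_emod_self_left]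
        exact pvPickEq fl k 0 x ((v1, i1) :: S') hpermf hmod
    · rw [if_neg hstop]
      have := pvFlatMain fl k S' [(v1, i1)] (0 + m * (v1 - 0)) v1
        (by rwa [List.singleton_append])
        (by intro p hp; simp at hp; subst hp; rfl)
        (List.pairwise_cons.mp hpw).1
        (List.pairwise_cons.mp hpw).2
        (by rw [hEv1]; ring)
        (by omega)
      exact this

-- B's value, with its lets resolved to the named helpers
lemma solution_alt_eq (fl : List Int) (k : Int) :
    solution_alt fl k =
      if (fl.length : Int) = 0 ∨ fl.sum ≤ k then -1
      else
        PySem.List.pyGetD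
          (pvRem fl (pvBS fl k (PySem.Int.floordiv k (fl.length : Int))
            ((PySem.List.max? fl (fun f => f)).getD 0)))
          (PySem.Int.mod
            (k - pvEaten fl (pvBS fl k (PySem.Int.floordiv k (fl.length : Int))
              ((PySem.List.max? fl (fun f => f)).getD 0)))
            ((pvRem fl (pvBS fl k (PySem.Int.floordiv k (fl.length : Int))
              ((PySem.List.max? fl (fun f => f)).getD 0))).length : Int)) 0 := rfl

-- the binary search lands on a level x with eaten(x) ≤ k < eaten(x+1)
lemma pvBS_spec (fl : List Int) (k : Int) :
    ∀ (n : ℕ) (lo hi : Int), (hi - lo).toNat ≤ n →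
      pvEaten fl lo ≤ k → k < pvEaten fl hi →
      pvEaten fl (pvBS fl k lo hi) ≤ k ∧ k < pvEaten fl (pvBS fl k lo hi + 1) := by
  intro n
  induction n with
  | zero =>
      intro lo hi hn hlo hhi
      have hlohi : lo < hi := by
        by_contra hc
        have := pvEaten_mono fl (by omega : hi ≤ lo)
        omega
      omega
  | succ n IH =>
      intro lo hi hn hlo hhi
      have hlohi : lo < hi := by
        by_contra hc
        have := pvEaten_mono fl (by omega : hi ≤ lo)
        omega
      rw [pvBS]
      by_cases hgap : 1 < hi - lo
      · rw [if_pos hgap]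
        have hmid : lo < PySem.Int.floordiv (lo + hi) 2 ∧ PySem.Int.floordiv (lo + hi) 2 < hi := by
          rw [PySem.Int.floordiv_eq_ediv_of_pos (by omega : (0:Int) < 2)]
          omega
        by_cases hmk : pvEaten fl (PySem.Int.floordiv (lo + hi) 2) ≤ k
        · rw [if_pos hmk]
          exact IH _ _ (by omega) hmk hhi
        · rw [if_neg hmk]
          exact IH _ _ (by omega) hlo (by omega)
      · rw [if_neg hgap]
        have hhi1 : hi = lo + 1 := by omega
        subst hhi1
        exact ⟨hlo, hhi⟩

-- ===== VERDICT (by name: the statement is the Claim_ definition above) =====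
theorem solution_spec : Claim_equal_solution := by
  intro fl k _
  unfold Spec_solution
  rw [A_eq_flat, solution_alt_eq]
  by_cases h0 : (fl.length : Int) = 0 ∨ fl.sum ≤ k
  · rw [if_pos h0]
    rcases h0 with hn | hsum
    · have hfl : fl = [] := by
        have : fl.length = 0 := by exact_mod_cast hn
        exact List.length_eq_zero_iff.mp this
      subst hfl
      rw [show pvS ([] : List Int) = [] from rfl, pvLoopB]
    · exact (pvFlatStart fl k).1 hsum
  · rw [if_neg h0]
    have hn : (fl.length : Int) ≠ 0 := fun h => h0 (Or.inl h)
    have hk : k < fl.sum := lt_of_not_ge (fun h => h0 (Or.inr h))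
    have hnpos : 0 < (fl.length : Int) := by
      have : fl.length ≠ 0 := by exact_mod_cast hn
      omega
    have hflne : fl ≠ [] := by
      intro h; subst h; simp at hnpos
    obtain ⟨mx, hmx⟩ : ∃ mx, PySem.List.max? fl (fun f => f) = some mx := by
      cases h : PySem.List.max? fl (fun f => f) with
      | none => exact absurd ((PySem.List.max?_eq_none_iff fl _).mp h) hflne
      | some mx => exact ⟨mx, rfl⟩
    have hlo0 : pvEaten fl (PySem.Int.floordiv k (fl.length : Int)) ≤ k := by
      have h1 := pvEaten_le_mul fl (PySem.Int.floordiv k (fl.length : Int))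
      have h2 := PySem.Int.floordiv_mul_add_mod k (fl.length : Int)
      have h3 := PySem.Int.mod_nonneg k hnpos
      nlinarith [h1, h2, h3]
    have hhi0 : k < pvEaten fl mx := by
      rw [pvEaten_high fl mx (PySem.List.max?_isMax hmx)]
      omega
    rw [hmx]
    obtain ⟨h1, h2⟩ := pvBS_spec fl k
      ((mx - PySem.Int.floordiv k (fl.length : Int)).toNat) _ _ le_rfl hlo0 hhi0
    exact (pvFlatStart fl k).2 _ h1 h2
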